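-- pv_equiv track=rewrite | github.com/paloxaal/builtly | pages/Brannkonsept.py | default_label_for_style
-- ===== SOURCE A (Python) =====
-- from typing import Any, Dict, Iterable, List, Optional, Tuple
--
-- def clean_pdf_text(text: Any) -> str:
--     if text is None:
--         return ""
--     text = str(text)
--     replacements = {
--         "–": "-",
--         "—": "-",
--         "“": '"',
--         "”": '"',
--         "‘": "'",
--         "’": "'",
--         "…": "...",
--         "•": "-",
--         "≤": "<=",
--         "≥": ">=",
--         "\u00ad": "",
--     }
--     for old, new in replacements.items():
--         text = text.replace(old, new)
--     return text.encode("latin-1", "replace").decode("latin-1")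
--
-- DEFAULT_LEGENDS = {
--     "site_plan": [
--         {"label": "Kjørbar atkomst brannvesen", "style": "fire_access"},
--         {"label": "Oppstillingsplass", "style": "staging_area"},
--         {"label": "Innsatsvei", "style": "attack_route"},
--     ],
--     "parking_plan": [
--         {"label": "Branncelle / brannskille", "style": "fire_compartment"},
--         {"label": "Rømningsvei", "style": "escape_route"},
--         {"label": "Rømningsretning", "style": "escape_arrow"},
--         {"label": "Innsatsvei brannvesen", "style": "attack_route"},
--     ],
--     "residential_floor_plan": [
--         {"label": "Branncelle EI 60", "style": "fire_compartment"},
--         {"label": "Rømningsvei", "style": "escape_route"},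
--         {"label": "Rømningsretning", "style": "escape_arrow"},
--         {"label": "Redningsvei / tilgjengelig balkong", "style": "rescue_route"},
--         {"label": "Innsatsvei brannvesen", "style": "attack_route"},
--     ],
--     "general_plan": [
--         {"label": "Brannteknisk markering", "style": "fire_compartment"},
--         {"label": "Rømningsvei", "style": "escape_route"},
--     ],
-- }
--
-- def default_label_for_style(style: str) -> str:
--     for legend_group in DEFAULT_LEGENDS.values():
--         for item in legend_group:
--             if item.get("style") == style:
--                 return clean_pdf_text(item.get("label", ""))
--     fallback = {
--         "note_box": "Kommentar",
--         "door_class": "EI2 30-C Sa",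
--         "core_fill": "Kjerne",
--     }
--     return fallback.get(style, clean_pdf_text(style.replace("_", " ").title()))
-- ===== SOURCE B (Python) =====
-- # Flat precomputed style->label table (first occurrence wins across DEFAULT_LEGENDS,
-- # labels are already latin-1 clean), plus the raw fallback entries; the function is
-- # one dict lookup with a title-cased default.
-- _TABLE = {
--     "fire_access": "Kj\u00f8rbar atkomst brannvesen",
--     "staging_area": "Oppstillingsplass",
--     "attack_route": "Innsatsvei",
--     "fire_compartment": "Branncelle / brannskille",
--     "escape_route": "R\u00f8mningsvei",
--     "escape_arrow": "R\u00f8mningsretning",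
--     "rescue_route": "Redningsvei / tilgjengelig balkong",
--     "note_box": "Kommentar",
--     "door_class": "EI2 30-C Sa",
--     "core_fill": "Kjerne",
-- }
--
-- def default_label_for_style(style):
--     label = _TABLE.get(style)
--     if label is None:
--         label = style.replace("_", " ").title()
--     return label
-- ===== Notes on version B (the rewrite author's own statement) =====
-- stated objective: simpler
-- what changed: A's nested scan over the legend groups with per-hit cleaning plus a local fallback dict is replaced by one flat precomputed style->label table, so the function body is a single dict lookup with a title-cased default (cleaning is the identity on the ASCII domain).
import Mathlib
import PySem

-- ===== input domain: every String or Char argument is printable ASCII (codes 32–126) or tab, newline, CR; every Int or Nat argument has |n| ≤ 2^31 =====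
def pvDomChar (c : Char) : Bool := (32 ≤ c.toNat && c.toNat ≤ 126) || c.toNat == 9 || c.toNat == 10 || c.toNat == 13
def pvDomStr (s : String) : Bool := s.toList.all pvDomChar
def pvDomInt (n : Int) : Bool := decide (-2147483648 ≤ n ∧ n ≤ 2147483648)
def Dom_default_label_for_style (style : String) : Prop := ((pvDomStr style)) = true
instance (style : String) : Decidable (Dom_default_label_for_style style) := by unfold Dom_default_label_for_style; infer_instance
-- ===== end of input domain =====

-- B replaces A's nested scan over the legend groups (plus the per-call cleaning and local
-- fallback dict) by one flat precomputed style→label table, so the function body is a single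
-- dict lookup with a title-cased default (objective: simpler).

-- ===== PORT A =====
-- shared module helper clean_pdf_text (text is always str here, so the None branch is dropped):
-- the replacement chain, then encode("latin-1","replace").decode("latin-1") = map chars > U+00FF to '?'
-- (exact: latin-1 encodes exactly U+0000..U+00FF, 'replace' substitutes b'?').
def pvReplacements : List (String × String) :=
  [("–", "-"), ("—", "-"), ("“", "\""), ("”", "\""), ("‘", "'"), ("’", "'"),
   ("…", "..."), ("•", "-"), ("≤", "<="), ("≥", ">="), ("\u00ad", "")]

def clean_pdf_text (text : String) : String :=
  let t := pvReplacements.foldl (fun s p => PySem.Str.replace s p.1 p.2) text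
  String.ofList (t.toList.map (fun c => if c.toNat ≤ 255 then c else '?'))

-- str.title(), hand-ported (exact on ASCII: 'cased' = letter): a letter is uppercased after a
-- non-letter and lowercased after a letter; other characters pass through.
def pvTitle : List Char → Bool → List Char
  | [], _ => []
  | c :: cs, prevCased =>
    if c.isAlpha then (if prevCased then c.toLower else c.toUpper) :: pvTitle cs true
    else c :: pvTitle cs false

-- the shared module constant DEFAULT_LEGENDS (dict of lists of dicts)
def DEFAULT_LEGENDS : PySem.Dict String (List (PySem.Dict String String)) :=
  PySem.Dict.ofList
    [ ("site_plan",
        [ PySem.Dict.ofList [("label", "Kjørbar atkomst brannvesen"), ("style", "fire_access")]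
        , PySem.Dict.ofList [("label", "Oppstillingsplass"), ("style", "staging_area")]
        , PySem.Dict.ofList [("label", "Innsatsvei"), ("style", "attack_route")] ])
    , ("parking_plan",
        [ PySem.Dict.ofList [("label", "Branncelle / brannskille"), ("style", "fire_compartment")]
        , PySem.Dict.ofList [("label", "Rømningsvei"), ("style", "escape_route")]
        , PySem.Dict.ofList [("label", "Rømningsretning"), ("style", "escape_arrow")]
        , PySem.Dict.ofList [("label", "Innsatsvei brannvesen"), ("style", "attack_route")] ])
    , ("residential_floor_plan",
        [ PySem.Dict.ofList [("label", "Branncelle EI 60"), ("style", "fire_compartment")]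
        , PySem.Dict.ofList [("label", "Rømningsvei"), ("style", "escape_route")]
        , PySem.Dict.ofList [("label", "Rømningsretning"), ("style", "escape_arrow")]
        , PySem.Dict.ofList [("label", "Redningsvei / tilgjengelig balkong"), ("style", "rescue_route")]
        , PySem.Dict.ofList [("label", "Innsatsvei brannvesen"), ("style", "attack_route")] ])
    , ("general_plan",
        [ PySem.Dict.ofList [("label", "Brannteknisk markering"), ("style", "fire_compartment")]
        , PySem.Dict.ofList [("label", "Rømningsvei"), ("style", "escape_route")] ]) ]

-- inner loop: 'for item in legend_group: if item.get("style") == style: return clean_pdf_text(item.get("label",""))'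
-- (None == style is False in Python, so the test is get? = some style)
def pvScanGroup (style : String) : List (PySem.Dict String String) → Option String
  | [] => none
  | item :: rest =>
    if item.get? "style" == some style then some (clean_pdf_text (item.getD "label" ""))
    else pvScanGroup style rest

-- outer loop over DEFAULT_LEGENDS.values()
def pvScanGroups (style : String) : List (List (PySem.Dict String String)) → Option String
  | [] => none
  | g :: gs =>
    match pvScanGroup style g with
    | some v => some v
    | none => pvScanGroups style gs

def default_label_for_style (style : String) : String :=
  match pvScanGroups style DEFAULT_LEGENDS.values with
  | some v => v
  | none =>
    let fallback : PySem.Dict String String :=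
      PySem.Dict.ofList [("note_box", "Kommentar"), ("door_class", "EI2 30-C Sa"), ("core_fill", "Kjerne")]
    (fallback.get? style).getD (clean_pdf_text (String.ofList (pvTitle (PySem.Str.replace style "_" " ").toList false)))

-- ===== PORT B =====
-- Source B's flat literal table _TABLE (no legend scan, no cleaning step)
def pvTable : PySem.Dict String String :=
  PySem.Dict.ofList
    [ ("fire_access", "Kjørbar atkomst brannvesen")
    , ("staging_area", "Oppstillingsplass")
    , ("attack_route", "Innsatsvei")
    , ("fire_compartment", "Branncelle / brannskille")
    , ("escape_route", "Rømningsvei")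
    , ("escape_arrow", "Rømningsretning")
    , ("rescue_route", "Redningsvei / tilgjengelig balkong")
    , ("note_box", "Kommentar")
    , ("door_class", "EI2 30-C Sa")
    , ("core_fill", "Kjerne") ]

-- Source B's str.title() call, rendered as a left fold carrying (reversed output, prev-was-cased)
def pvTitleB (cs : List Char) : List Char :=
  (cs.foldl
    (fun (st : List Char × Bool) c =>
      if c.isAlpha then ((if st.2 then c.toLower else c.toUpper) :: st.1, true)
      else (c :: st.1, false))
    (([] : List Char), false)).1.reverse

def default_label_for_style_alt (style : String) : String :=
  match pvTable.get? style with
  | some label => label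
  | none => String.ofList (pvTitleB (PySem.Str.replace style "_" " ").toList)

-- ===== PRECONDITION & SPEC =====
def Spec_default_label_for_style (style : String) (out : String) : Prop := out = default_label_for_style_alt style
instance (style : String) (out : String) : Decidable (Spec_default_label_for_style style out) := by unfold Spec_default_label_for_style; infer_instance

-- ===== CLAIM =====
def Claim_equal_default_label_for_style : Prop := ∀ (style : String), Dom_default_label_for_style style → Spec_default_label_for_style style (default_label_for_style style)

-- ===== LEMMAS AND PROOFS =====

-- replace with a single-character pattern is a flatMap over the characters
theorem pvGo_flat (o : Char) (n : List Char) : ∀ (l acc : List Char),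
    PySem.Chars.replace.go [o] n l.length l acc
      = acc.reverse ++ l.flatMap (fun c => if c = o then n else [c]) := by
  intro l
  induction l with
  | nil => intro acc; simp [PySem.Chars.replace.go]
  | cons c t ih =>
    intro acc
    rw [List.length_cons, PySem.Chars.replace.go]
    by_cases h : c = o
    · subst h; simp [List.isPrefixOf, ih]
    · have h' : ¬ o = c := fun hh => h hh.symm
      simp [List.isPrefixOf, h, h', ih]

theorem pvReplace_flat (s : List Char) (o : Char) (n : List Char) :
    PySem.Chars.replace s [o] n = s.flatMap (fun c => if c = o then n else [c]) := by
  rw [PySem.Chars.replace]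
  simp [pvGo_flat]

theorem pvReplace_id (s : List Char) (o : Char) (n : List Char) (h : o ∉ s) :
    PySem.Chars.replace s [o] n = s := by
  rw [pvReplace_flat]
  induction s with
  | nil => rfl
  | cons c t ih =>
    simp at h
    have hco : ¬ c = o := fun hh => h.1 hh.symm
    simp [List.flatMap_cons, hco, ih h.2]

-- the replacement chain of clean_pdf_text never fires on an all-ASCII string
theorem pvFold_clean (ps : List (String × String))
    (hp : ∀ p ∈ ps, p.1.toList.length = 1 ∧ 126 < (p.1.toList.headD 'a').toNat) :
    ∀ (s : String), (∀ c ∈ s.toList, c.toNat ≤ 126) →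
      (ps.foldl (fun s p => PySem.Str.replace s p.1 p.2) s).toList = s.toList := by
  induction ps with
  | nil => intro s _; rfl
  | cons p ps ih =>
    intro s hs
    obtain ⟨hlen, hbig⟩ := hp p (List.mem_cons_self ..)
    obtain ⟨o, ho1⟩ := List.length_eq_one_iff.mp hlen
    have ho2 : 126 < o.toNat := by rw [ho1] at hbig; exact hbig
    have hno : o ∉ s.toList := fun hm => absurd (hs o hm) (by omega)
    have hstep : (PySem.Str.replace s p.1 p.2).toList = s.toList := by
      rw [PySem.Str.toList_replace, ho1, pvReplace_id _ _ _ hno]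
    rw [List.foldl_cons, ih (fun q hq => hp q (List.mem_cons_of_mem _ hq)) _ (by rw [hstep]; exact hs)]
    exact hstep

set_option maxRecDepth 8192 in
theorem pvClean_id (X : List Char) (h : ∀ c ∈ X, c.toNat ≤ 126) :
    clean_pdf_text (String.ofList X) = String.ofList X := by
  simp only [clean_pdf_text]
  have hfold := pvFold_clean pvReplacements
    (by intro p hp; fin_cases hp <;> exact ⟨by decide, by decide⟩) (String.ofList X)
    (by simpa using h)
  rw [hfold]
  have hmap : X.map (fun c => if c.toNat ≤ 255 then c else '?') = X := by
    conv_rhs => rw [← List.map_id X]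
    exact List.map_congr_left (fun c hcX => by
      simp [show c.toNat ≤ 255 by have := h c hcX; omega])
  simp [hmap]

theorem pvUpper_le (c : Char) (h : c.toNat ≤ 126) : c.toUpper.toNat ≤ 126 := by
  rw [Char.toUpper]
  split
  · next h2 =>
    obtain ⟨h1, h2⟩ := h2
    have g1 : (97:UInt32).toNat ≤ c.val.toNat := UInt32.le_iff_toNat_le.mp h1
    have g2 : c.val.toNat ≤ (122:UInt32).toNat := UInt32.le_iff_toNat_le.mp h2
    show (c.val + ('A'.val - 'a'.val)).toNat ≤ 126
    rw [UInt32.toNat_add]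
    simp at g1 g2 ⊢
    omega
  · exact h

theorem pvLower_le (c : Char) (h : c.toNat ≤ 126) : c.toLower.toNat ≤ 126 := by
  rw [Char.toLower]
  split
  · next h2 =>
    obtain ⟨h1, h2⟩ := h2
    have g1 : (65:UInt32).toNat ≤ c.val.toNat := UInt32.le_iff_toNat_le.mp h1
    have g2 : c.val.toNat ≤ (90:UInt32).toNat := UInt32.le_iff_toNat_le.mp h2
    show (c.val + ('a'.val - 'A'.val)).toNat ≤ 126
    rw [UInt32.toNat_add]
    simp at g1 g2 ⊢
    omega
  · exact h

theorem pvTitle_le (cs : List Char) (b : Bool) (h : ∀ c ∈ cs, c.toNat ≤ 126) :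
    ∀ c ∈ pvTitle cs b, c.toNat ≤ 126 := by
  induction cs generalizing b with
  | nil => simp [pvTitle]
  | cons c t ih =>
    simp at h
    by_cases ha : c.isAlpha
    · cases b <;>
        simpa [pvTitle, ha, pvUpper_le c h.1, pvLower_le c h.1] using ih true h.2
    · simpa [pvTitle, ha, h.1] using ih false h.2

-- B's fold renders the same title-casing as A's structural recursion
theorem pvTitleB_inv (cs : List Char) : ∀ (acc : List Char) (b : Bool),
    (cs.foldl
      (fun (st : List Char × Bool) c =>
        if c.isAlpha then ((if st.2 then c.toLower else c.toUpper) :: st.1, true)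
        else (c :: st.1, false))
      (acc, b)).1.reverse = acc.reverse ++ pvTitle cs b := by
  induction cs with
  | nil => intro acc b; simp [pvTitle]
  | cons c t ih =>
    intro acc b
    by_cases ha : c.isAlpha
    · simp [pvTitle, ha, List.foldl_cons, ih]
    · simp [pvTitle, ha, List.foldl_cons, ih]

theorem pvTitleB_eq (cs : List Char) : pvTitleB cs = pvTitle cs false := by
  simpa using pvTitleB_inv cs [] false

-- characters stay ASCII through style.replace("_", " ")
theorem pvReplaceUnderscore_le (s : String) (h : ∀ c ∈ s.toList, c.toNat ≤ 126) :
    ∀ c ∈ (PySem.Str.replace s "_" " ").toList, c.toNat ≤ 126 := by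
  intro c hc
  rw [PySem.Str.toList_replace, show ("_".toList) = ['_'] from rfl,
    show (" ".toList) = [' '] from rfl, pvReplace_flat, List.mem_flatMap] at hc
  obtain ⟨d, hd, hcd⟩ := hc
  by_cases hdu : d = '_'
  · rw [if_pos hdu, List.mem_singleton] at hcd; subst hcd; decide
  · rw [if_neg hdu, List.mem_singleton] at hcd; subst hcd; exact h _ hd

-- the literal dicts of A and B's literal table, evaluated once to their stored pair lists
set_option maxRecDepth 8192 in
theorem pvValues_eq : DEFAULT_LEGENDS.values =
    [ [ PySem.Dict.mk [("label", "Kjørbar atkomst brannvesen"), ("style", "fire_access")]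
      , PySem.Dict.mk [("label", "Oppstillingsplass"), ("style", "staging_area")]
      , PySem.Dict.mk [("label", "Innsatsvei"), ("style", "attack_route")] ]
    , [ PySem.Dict.mk [("label", "Branncelle / brannskille"), ("style", "fire_compartment")]
      , PySem.Dict.mk [("label", "Rømningsvei"), ("style", "escape_route")]
      , PySem.Dict.mk [("label", "Rømningsretning"), ("style", "escape_arrow")]
      , PySem.Dict.mk [("label", "Innsatsvei brannvesen"), ("style", "attack_route")] ]
    , [ PySem.Dict.mk [("label", "Branncelle EI 60"), ("style", "fire_compartment")]
      , PySem.Dict.mk [("label", "Rømningsvei"), ("style", "escape_route")]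
      , PySem.Dict.mk [("label", "Rømningsretning"), ("style", "escape_arrow")]
      , PySem.Dict.mk [("label", "Redningsvei / tilgjengelig balkong"), ("style", "rescue_route")]
      , PySem.Dict.mk [("label", "Innsatsvei brannvesen"), ("style", "attack_route")] ]
    , [ PySem.Dict.mk [("label", "Brannteknisk markering"), ("style", "fire_compartment")]
      , PySem.Dict.mk [("label", "Rømningsvei"), ("style", "escape_route")] ] ] := by decide

set_option maxRecDepth 8192 in
theorem pvFallback_eq : PySem.Dict.ofList
    [("note_box", "Kommentar"), ("door_class", "EI2 30-C Sa"), ("core_fill", "Kjerne")]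
    = PySem.Dict.mk [("note_box", "Kommentar"), ("door_class", "EI2 30-C Sa"), ("core_fill", "Kjerne")] := by decide

set_option maxRecDepth 8192 in
theorem pvTable_eq : pvTable = PySem.Dict.mk
    [ ("fire_access", "Kjørbar atkomst brannvesen")
    , ("staging_area", "Oppstillingsplass")
    , ("attack_route", "Innsatsvei")
    , ("fire_compartment", "Branncelle / brannskille")
    , ("escape_route", "Rømningsvei")
    , ("escape_arrow", "Rømningsretning")
    , ("rescue_route", "Redningsvei / tilgjengelig balkong")
    , ("note_box", "Kommentar")
    , ("door_class", "EI2 30-C Sa")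
    , ("core_fill", "Kjerne") ] := by decide

-- ===== VERDICT (by name: the statement is the Claim_ definition above) =====
set_option maxRecDepth 8192 in
theorem default_label_for_style_spec : Claim_equal_default_label_for_style := by
  intro style hdom
  unfold Spec_default_label_for_style
  by_cases h1 : "fire_access" = style
  · subst h1; decide
  by_cases h2 : "staging_area" = style
  · subst h2; decide
  by_cases h3 : "attack_route" = style
  · subst h3; decide
  by_cases h4 : "fire_compartment" = style
  · subst h4; decide
  by_cases h5 : "escape_route" = style
  · subst h5; decide
  by_cases h6 : "escape_arrow" = style
  · subst h6; decide
  by_cases h7 : "rescue_route" = style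
  · subst h7; decide
  by_cases h8 : "note_box" = style
  · subst h8; decide
  by_cases h9 : "door_class" = style
  · subst h9; decide
  by_cases h10 : "core_fill" = style
  · subst h10; decide
  -- style matches no legend style and no table/fallback key: A returns the cleaned
  -- title-cased name, B the title-cased name; cleaning is the identity on ASCII.
  have hascii : ∀ c ∈ style.toList, c.toNat ≤ 126 := by
    intro c hc
    have := List.all_eq_true.mp hdom c hc
    simp [pvDomChar] at this
    omega
  have hT : ∀ c ∈ pvTitle (PySem.Str.replace style "_" " ").toList false, c.toNat ≤ 126 :=
    pvTitle_le _ _ (pvReplaceUnderscore_le style hascii)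
  have hA : default_label_for_style style
      = clean_pdf_text (String.ofList (pvTitle (PySem.Str.replace style "_" " ").toList false)) := by
    simp [default_label_for_style, pvValues_eq, pvFallback_eq, pvScanGroups, pvScanGroup,
      PySem.Dict.get?, beq_iff_eq, h1, h2, h3, h4, h5, h6, h7, h8, h9, h10]
  have hB : default_label_for_style_alt style
      = String.ofList (pvTitleB (PySem.Str.replace style "_" " ").toList) := by
    simp [default_label_for_style_alt, pvTable_eq, PySem.Dict.get?, beq_iff_eq,
      h1, h2, h3, h4, h5, h6, h7, h8, h9, h10]
  rw [hA, hB, pvTitleB_eq]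
  exact pvClean_id _ hT
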